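-- pv_equiv track=rewrite | github.com/ParkerZhang/SketchBook | watercolor/openclaw/skills/zuozhuan-search/scripts/search_keyword.py | highlight_matches
-- ===== SOURCE A (Python) =====
-- def highlight_matches(text: str, query: str, max_len: int = 150) -> str:
--     """
--     Find and highlight the first occurrence of query chars in text.
--     Returns a snippet with context.
--     """
--     # Find first matching character position
--     for i, c in enumerate(text):
--         if c in query:
--             start = max(0, i - 10)
--             end = min(len(text), i + max_len)
--             snippet = text[start:end].replace('\n', ' ')
--             if start > 0:
--                 snippet = "..." + snippet
--             if end < len(text):
--                 snippet = snippet + "..."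
--             return snippet
--     return text[:max_len].replace('\n', ' ')
-- ===== SOURCE B (Python) =====
-- def _snippet(text, i, max_len):
--     start = max(0, i - 10)
--     end = min(len(text), i + max_len)
--     snippet = text[start:end].replace('\n', ' ')
--     if start > 0:
--         snippet = "..." + snippet
--     if end < len(text):
--         snippet = snippet + "..."
--     return snippet
--
--
-- def highlight_matches(text: str, query: str, max_len: int = 150) -> str:
--     # First match position = minimum over the distinct query chars of text.find(q)
--     positions = [p for p in (text.find(q) for q in dict.fromkeys(query)) if p != -1]
--     if positions:
--         return _snippet(text, min(positions), max_len)
--     return text[:max_len].replace('\n', ' ')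
-- ===== Notes on version B (the rewrite author's own statement) =====
-- stated objective: alternative
-- what changed: Replaces A's character-by-character scan of text (testing 'c in query' at each position) by one text.find(q) per distinct query character, taking the minimum of the hit positions; the snippet formatting is factored into a helper.
import Mathlib
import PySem

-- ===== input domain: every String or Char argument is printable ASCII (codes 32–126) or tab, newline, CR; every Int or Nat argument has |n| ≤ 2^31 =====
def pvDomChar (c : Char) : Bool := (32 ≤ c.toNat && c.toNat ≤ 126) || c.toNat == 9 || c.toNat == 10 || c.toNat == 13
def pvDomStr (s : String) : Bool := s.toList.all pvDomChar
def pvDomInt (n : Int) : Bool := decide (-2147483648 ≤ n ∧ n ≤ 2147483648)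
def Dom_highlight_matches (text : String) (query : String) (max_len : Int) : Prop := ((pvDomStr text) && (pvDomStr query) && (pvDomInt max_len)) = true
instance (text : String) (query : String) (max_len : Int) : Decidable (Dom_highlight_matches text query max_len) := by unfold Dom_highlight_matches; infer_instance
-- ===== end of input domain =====

-- B replaces A's per-character scan of text by one text.find(q) per distinct query character
-- and takes the minimum hit position (objective: alternative algorithm, same cost class).

-- ===== PORT A =====
-- A's loop: for i, c in enumerate(text): if c in query: return <snippet>; fall-through default.
def hmAGo (text : String) (query : String) (max_len : Int) : List (Int × Char) → String
  | [] => PySem.Str.replace (PySem.Str.slice text none (some max_len)) "\n" " "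
  | (i, c) :: rest =>
    if PySem.Str.isIn (String.singleton c) query then
      let start := max 0 (i - 10)
      let stop := min (PySem.Str.len text) (i + max_len)
      let snippet := PySem.Str.replace (PySem.Str.slice text (some start) (some stop)) "\n" " "
      let snippet := if start > 0 then "..." ++ snippet else snippet
      let snippet := if stop < PySem.Str.len text then snippet ++ "..." else snippet
      snippet
    else hmAGo text query max_len rest

def highlight_matches (text : String) (query : String) (max_len : Int) : String :=
  hmAGo text query max_len (PySem.List.enumerate text.toList 0)

-- ===== PORT B =====
-- helper _snippet of Source B
def hmSnippet (text : String) (i : Int) (max_len : Int) : String :=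
  let start := max 0 (i - 10)
  let stop := min (PySem.Str.len text) (i + max_len)
  let snippet := PySem.Str.replace (PySem.Str.slice text (some start) (some stop)) "\n" " "
  let snippet := if start > 0 then "..." ++ snippet else snippet
  let snippet := if stop < PySem.Str.len text then snippet ++ "..." else snippet
  snippet

def highlight_matches_alt (text : String) (query : String) (max_len : Int) : String :=
  let positions :=
    ((PySem.List.dedup query.toList).map
      (fun q => PySem.Str.find text (String.singleton q))).filter (fun p => p != -1)
  match PySem.List.min? positions (fun p => p) with
  | some m => hmSnippet text m max_len
  | none => PySem.Str.replace (PySem.Str.slice text none (some max_len)) "\n" " "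

-- ===== PRECONDITION & SPEC =====
def Spec_highlight_matches (text : String) (query : String) (max_len : Int) (out : String) : Prop := out = highlight_matches_alt text query max_len
instance (text : String) (query : String) (max_len : Int) (out : String) : Decidable (Spec_highlight_matches text query max_len out) := by unfold Spec_highlight_matches; infer_instance

-- ===== CLAIM (what is proved, stated in full; the proofs are below) =====
def Claim_equal_highlight_matches : Prop := ∀ (text : String) (query : String) (max_len : Int), Dom_highlight_matches text query max_len → Spec_highlight_matches text query max_len (highlight_matches text query max_len)

-- ===== LEMMAS AND PROOFS =====

-- `c in query` on a single character is membership in query's characters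
theorem hm_isIn_singleton (c : Char) (l : List Char) :
    PySem.Chars.isIn [c] l = decide (c ∈ l) := by
  by_cases h : c ∈ l
  · simp only [h, decide_true]
    rw [PySem.Chars.isIn_iff_infix]
    exact (List.singleton_infix_iff c l).mpr h
  · simp only [h, decide_false]
    rw [PySem.Chars.isIn_eq_false_iff]
    intro hin
    exact h ((List.singleton_infix_iff c l).mp hin)

theorem hm_singleton_prefix_iff (q : Char) (l : List Char) :
    [q] <+: l ↔ l.head? = some q := by
  cases l with
  | nil => simp
  | cons a t => simp [List.cons_prefix_iff]

-- A's scan on enumerate returns the snippet at the first index whose char is in query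
theorem hmAGo_eq_findIdx? (text query : String) (max_len : Int) (cs : List Char) (k : Nat) :
    hmAGo text query max_len (PySem.List.enumerate cs (k : Int)) =
      match List.findIdx? (fun c => decide (c ∈ query.toList)) cs with
      | some j => hmSnippet text ((k : Int) + (j : Int)) max_len
      | none => PySem.Str.replace (PySem.Str.slice text none (some max_len)) "\n" " " := by
  induction cs generalizing k with
  | nil => simp [PySem.List.enumerate_nil, hmAGo]
  | cons c rest ih =>
    rw [PySem.List.enumerate_cons, hmAGo]
    simp only [PySem.Str.isIn_eq, String.toList_singleton, hm_isIn_singleton,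
      List.findIdx?_cons]
    by_cases h : c ∈ query.toList
    · simp only [h, decide_true, if_true]
      show hmSnippet text ((k : Int)) max_len = hmSnippet text ((k : Int) + ((0 : Nat) : Int)) max_len
      norm_num
    · simp only [h, decide_false, Bool.false_eq_true, if_false]
      have hk1 : ((k : Int) + 1) = ((k + 1 : Nat) : Int) := by push_cast; ring
      rw [hk1, ih (k + 1)]
      cases hf : List.findIdx? (fun c => decide (c ∈ query.toList)) rest with
      | none => simp
      | some j =>
        simp only [Option.map_some]
        congr 1
        push_cast
        ring

-- find text "q" = j  iff  text[j] = q and no earlier occurrence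
theorem hm_find_eq_of (cs : List Char) (q : Char) (j : Nat)
    (hj : (cs.drop j).head? = some q) (hmin : ∀ i < j, (cs.drop i).head? ≠ some q) :
    PySem.Chars.find cs [q] = (j : Int) := by
  have hpfx : [q] <+: cs.drop j := (hm_singleton_prefix_iff q (cs.drop j)).mpr hj
  have hinf : [q] <:+: cs := hpfx.isInfix.trans (cs.drop_suffix j).isInfix
  have hnn : 0 ≤ PySem.Chars.find cs [q] := (PySem.Chars.find_nonneg_iff cs [q]).mpr hinf
  obtain ⟨hpre, hfirst⟩ := PySem.Chars.find_spec hnn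
  have h1 : (cs.drop (PySem.Chars.find cs [q]).toNat).head? = some q :=
    (hm_singleton_prefix_iff q _).mp hpre
  have hle : (PySem.Chars.find cs [q]).toNat ≤ j := by
    by_contra hlt
    exact hfirst j (by omega) ((hm_singleton_prefix_iff q _).mpr hj)
  have hge : j ≤ (PySem.Chars.find cs [q]).toNat := by
    by_contra hlt
    exact hmin _ (by omega) h1
  omega

-- the B-side minimum of finds equals A's first-match index
theorem hm_min_positions (cs qs : List Char) :
    PySem.List.min?
      (((PySem.List.dedup qs).map (fun q => PySem.Chars.find cs [q])).filter (fun p => p != -1))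
      (fun p => p) =
    Option.map Int.ofNat (List.findIdx? (fun c => decide (c ∈ qs)) cs) := by
  cases hf : List.findIdx? (fun c => decide (c ∈ qs)) cs with
  | none =>
    have hall := List.findIdx?_eq_none_iff.mp hf
    simp only [Option.map_none]
    rw [PySem.List.min?_eq_none_iff, List.filter_eq_nil_iff]
    intro p hp
    obtain ⟨q, hq, rfl⟩ := List.mem_map.mp hp
    have hq' : q ∈ qs := (PySem.List.mem_dedup qs q).mp hq
    have hninf : ¬ [q] <:+: cs := by
      rw [List.singleton_infix_iff]
      intro hmem
      have := hall q hmem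
      simp [hq'] at this
    have hm1 : PySem.Chars.find cs [q] = -1 := (PySem.Chars.find_eq_neg_one_iff cs [q]).mpr hninf
    simp [hm1]
  | some j =>
    obtain ⟨hjlt, hpj, hfirst⟩ := List.findIdx?_eq_some_iff_getElem.mp hf
    simp only [decide_eq_true_eq] at hpj hfirst
    set positions := ((PySem.List.dedup qs).map (fun q => PySem.Chars.find cs [q])).filter (fun p => p != -1) with hpos
    have hjmem : ((j : Nat) : Int) ∈ positions := by
      have hfind : PySem.Chars.find cs [cs[j]'hjlt] = (j : Int) := by
        apply hm_find_eq_of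
        · rw [List.head?_drop]
          exact List.getElem?_eq_getElem hjlt
        · intro i hi hcontra
          rw [List.head?_drop] at hcontra
          have hilt : i < cs.length := by omega
          have hceq : cs[i]'hilt = cs[j]'hjlt := by
            simpa [List.getElem?_eq_getElem hilt] using hcontra
          exact hfirst i hi (hceq ▸ hpj)
      rw [hpos, List.mem_filter]
      refine ⟨List.mem_map.mpr ⟨cs[j]'hjlt, (PySem.List.mem_dedup qs _).mpr hpj, hfind⟩, by simp⟩
    have hlb : ∀ p ∈ positions, ((j : Nat) : Int) ≤ p := by
      intro p hp
      rw [hpos, List.mem_filter] at hp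
      obtain ⟨hpm, hpne⟩ := hp
      obtain ⟨q, hq, rfl⟩ := List.mem_map.mp hpm
      have hne : PySem.Chars.find cs [q] ≠ -1 := by simpa using hpne
      have hnn : 0 ≤ PySem.Chars.find cs [q] := by
        have := PySem.Chars.neg_one_le_find cs [q]
        omega
      obtain ⟨hpre, -⟩ := PySem.Chars.find_spec hnn
      have hhd := (hm_singleton_prefix_iff q _).mp hpre
      rw [List.head?_drop] at hhd
      set n := (PySem.Chars.find cs [q]).toNat with hn
      have hnlt : n < cs.length := (List.getElem?_eq_some_iff.mp hhd).1
      have hcn : cs[n]'hnlt = q := by simpa [List.getElem?_eq_getElem hnlt] using hhd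
      have hqin : q ∈ qs := (PySem.List.mem_dedup qs q).mp hq
      have hjn : j ≤ n := by
        by_contra hlt
        exact hfirst n (by omega) (hcn ▸ hqin)
      omega
    cases hm : PySem.List.min? positions (fun p => p) with
    | none =>
      rw [PySem.List.min?_eq_none_iff] at hm
      simp [hm] at hjmem
    | some m =>
      have hmmem := PySem.List.min?_mem hm
      have hmin := PySem.List.min?_isMin hm
      have h1 : m ≤ ((j : Nat) : Int) := hmin _ hjmem
      have h2 : ((j : Nat) : Int) ≤ m := hlb m hmmem
      have : m = ((j : Nat) : Int) := le_antisymm h1 h2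
      simp [this]

-- ===== VERDICT (by name: the statement is the Claim_ definition above) =====
theorem highlight_matches_spec : Claim_equal_highlight_matches := by
  intro text query max_len _
  unfold Spec_highlight_matches highlight_matches highlight_matches_alt
  have h0 : (0 : Int) = ((0 : Nat) : Int) := rfl
  rw [h0, hmAGo_eq_findIdx? text query max_len text.toList 0]
  have hfind : ∀ q : Char, PySem.Str.find text (String.singleton q) = PySem.Chars.find text.toList [q] := by
    intro q
    rw [PySem.Str.find_eq, String.toList_singleton]
  simp only [hfind]
  rw [hm_min_positions text.toList query.toList]
  cases List.findIdx? (fun c => decide (c ∈ query.toList)) text.toList with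
  | none => simp
  | some j => simp
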